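-- pv_equiv track=rewrite | github.com/kitamura-tetsuo/auto-coder | src/auto_coder/conflict_resolver.py | merge_dep_maps
-- ===== SOURCE A (Python) =====
-- from typing import Any, Dict, List, Optional
--
-- def parse_semver_to_tuple(v: str) -> Optional[tuple]:
--     """Parse a semver-ish string to a comparable tuple of ints.
--     - Strips common range operators (^, ~, >=, <=, >, <, =)
--     - Ignores pre-release/build metadata
--     - Returns None if parsing fails
--     """
--     if not isinstance(v, str) or not v:
--         return None
--     # Strip range operators and spaces
--     s = v.strip()
--     while s and s[0] in ("^", "~", ">", "<", "=", "v"):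
--         s = s[1:]
--     # Remove leading = if any remain
--     s = s.lstrip("=")
--     # Split on hyphen (prerelease) and plus (build)
--     s = s.split("+", 1)[0].split("-", 1)[0]
--     parts = s.split(".")
--     nums: List[int] = []
--     for p in parts:
--         if p.isdigit():
--             nums.append(int(p))
--         else:
--             # Stop at first non-numeric segment
--             break
--     if not nums:
--         return None
--     while len(nums) < 3:
--         nums.append(0)
--     return tuple(nums[:3])
--
-- def compare_semver(a: str, b: str) -> int:
--     """Compare two version strings. Return 1 if a>b, -1 if a<b, 0 if equal/unknown.
--     Best-effort for common semver patterns.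
--     """
--     ta = parse_semver_to_tuple(a)
--     tb = parse_semver_to_tuple(b)
--     if ta is None or tb is None:
--         # Unknown comparison
--         return 0
--     if ta > tb:
--         return 1
--     if ta < tb:
--         return -1
--     return 0
--
-- def merge_dep_maps(
--     ours: Dict[str, str], theirs: Dict[str, str], prefer_side: str
-- ) -> Dict[str, str]:
--     """Merge two dependency maps choosing newer version when conflict.
--     prefer_side: 'ours' or 'theirs' used as tie-breaker when versions equal/unknown.
--     """
--     result: Dict[str, str] = {}
--     keys = set(ours.keys()) | set(theirs.keys())
--     for k in sorted(keys):
--         va = ours.get(k)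
--         vb = theirs.get(k)
--         if va is None:
--             result[k] = vb  # type: ignore
--         elif vb is None:
--             result[k] = va
--         else:
--             cmp = compare_semver(va, vb)
--             if cmp > 0:
--                 result[k] = va
--             elif cmp < 0:
--                 result[k] = vb
--             else:
--                 # Equal or unknown: prefer side with "more" deps overall
--                 if prefer_side == "ours":
--                     result[k] = va
--                 else:
--                     result[k] = vb
--     return result
-- ===== SOURCE B (Python) =====
-- from typing import List, Optional
--
--
-- def parse_semver_to_tuple(v: str) -> Optional[tuple]:
--     """Parse a semver-ish string to a comparable tuple of ints (same module helper as A)."""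
--     if not isinstance(v, str) or not v:
--         return None
--     s = v.strip()
--     while s and s[0] in ("^", "~", ">", "<", "=", "v"):
--         s = s[1:]
--     s = s.lstrip("=")
--     s = s.split("+", 1)[0].split("-", 1)[0]
--     parts = s.split(".")
--     nums: List[int] = []
--     for p in parts:
--         if p.isdigit():
--             nums.append(int(p))
--         else:
--             break
--     if not nums:
--         return None
--     while len(nums) < 3:
--         nums.append(0)
--     return tuple(nums[:3])
--
--
-- def compare_semver(a: str, b: str) -> int:
--     ta = parse_semver_to_tuple(a)
--     tb = parse_semver_to_tuple(b)
--     if ta is None or tb is None: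
--         return 0
--     if ta > tb:
--         return 1
--     if ta < tb:
--         return -1
--     return 0
--
--
-- def merge_dep_maps(ours, theirs, prefer_side):
--     """Merge two dependency maps choosing the newer version on conflict.
--
--     Two-pointer merge: sort each side's items by key once, then walk both
--     sorted lists in lockstep, resolving a conflict only when the two heads
--     carry the same key.  No key-union set and no dict lookups.
--     """
--     a = sorted(ours.items(), key=lambda kv: kv[0])
--     b = sorted(theirs.items(), key=lambda kv: kv[0])
--     i = j = 0
--     merged = []
--     while i < len(a) and j < len(b):
--         ka, va = a[i]
--         kb, vb = b[j]
--         if ka < kb: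
--             merged.append((ka, va))
--             i += 1
--         elif kb < ka:
--             merged.append((kb, vb))
--             j += 1
--         else:
--             c = compare_semver(va, vb)
--             if c > 0:
--                 w = va
--             elif c < 0:
--                 w = vb
--             else:
--                 w = va if prefer_side == "ours" else vb
--             merged.append((ka, w))
--             i += 1
--             j += 1
--     merged.extend(a[i:])
--     merged.extend(b[j:])
--     return dict(merged)
-- ===== Notes on version B (the rewrite author's own statement) =====
-- stated objective: alternative
-- what changed: B replaces A's key-union-set-then-per-key-dict-lookup scan by a classic two-pointer merge: it sorts each side's item list by key once and walks the two sorted lists in lockstep, resolving a conflict only when the heads share a key, so there is no union set and no dict lookup at all.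
import Mathlib
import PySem

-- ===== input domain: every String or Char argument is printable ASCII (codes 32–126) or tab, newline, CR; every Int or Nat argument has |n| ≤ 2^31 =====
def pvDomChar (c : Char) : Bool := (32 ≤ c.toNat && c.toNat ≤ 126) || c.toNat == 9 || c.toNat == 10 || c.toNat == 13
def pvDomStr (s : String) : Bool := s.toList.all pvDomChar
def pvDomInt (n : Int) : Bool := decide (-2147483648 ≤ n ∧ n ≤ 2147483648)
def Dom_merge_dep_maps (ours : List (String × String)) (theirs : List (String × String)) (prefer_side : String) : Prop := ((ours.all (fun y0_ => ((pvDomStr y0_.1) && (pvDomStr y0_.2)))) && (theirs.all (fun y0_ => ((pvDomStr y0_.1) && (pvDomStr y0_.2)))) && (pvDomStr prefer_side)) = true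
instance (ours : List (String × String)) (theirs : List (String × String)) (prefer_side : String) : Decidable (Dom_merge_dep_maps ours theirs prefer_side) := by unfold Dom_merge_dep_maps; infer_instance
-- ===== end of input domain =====

-- B replaces A's key-union-plus-dict-lookups scan by a two-pointer merge of the two
-- key-sorted item lists (objective: alternative; similar cost).

-- ===== shared module helpers (parse_semver_to_tuple / compare_semver are module-level
-- helpers of merge_dep_maps; Source A and Source B carry the identical code, so one port serves both) =====

-- c in ("^", "~", ">", "<", "=", "v")
def pvOpsChar (c : Char) : Bool := c == '^' || c == '~' || c == '>' || c == '<' || c == '=' || c == 'v'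

-- for p in parts: if p.isdigit(): nums.append(int(p)) else: break
-- (int(p) via ofChars?; the .getD 0 default is unreachable since p.isdigit() holds there)
def pvSemverNums : List (List Char) → List Int
  | [] => []
  | p :: rest =>
    if PySem.Chars.strIsdigit p then ((PySem.Int.ofChars? p).getD 0) :: pvSemverNums rest else []

def parse_semver_to_tuple (v : String) : Option (Int × Int × Int) :=
  if v.toList = [] then none    -- `not v`; the isinstance test is always true on str
  else
    let s := PySem.Chars.strip v.toList
    -- while s and s[0] in ("^","~",">","<","=","v"): s = s[1:]   (= drop leading such chars; exact)
    let s := s.dropWhile pvOpsChar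
    -- s.lstrip("=") : drop leading '=' (single strip char; exact)
    let s := s.dropWhile (· == '=')
    let s := (PySem.Chars.splitOnMax s ['+'] 1).headD []   -- s.split("+", 1)[0]
    let s := (PySem.Chars.splitOnMax s ['-'] 1).headD []   -- s.split("-", 1)[0]
    let parts := PySem.Chars.splitOn s ['.']
    let nums := pvSemverNums parts
    if nums = [] then none
    else
      -- while len(nums) < 3: nums.append(0); tuple(nums[:3])
      let nums := nums ++ List.replicate (3 - nums.length) 0
      some (nums.getD 0 0, nums.getD 1 0, nums.getD 2 0)

-- Python lexicographic '<' on two int 3-tuples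
def pvTupLt (x y : Int × Int × Int) : Bool :=
  x.1 < y.1 || (x.1 == y.1 && (x.2.1 < y.2.1 || (x.2.1 == y.2.1 && x.2.2 < y.2.2)))

def compare_semver (a b : String) : Int :=
  match parse_semver_to_tuple a, parse_semver_to_tuple b with
  | some ta, some tb => if pvTupLt tb ta then 1 else if pvTupLt ta tb then -1 else 0
  | _, _ => 0

-- ===== PORT A =====
def merge_dep_maps (ours : List (String × String)) (theirs : List (String × String)) (prefer_side : String) : List (String × String) :=
  let oursD := PySem.Dict.ofList ours
  let theirsD := PySem.Dict.ofList theirs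
  let keys : PySem.Set String :=
    PySem.Set.union (PySem.Set.ofList oursD.keys) (PySem.Set.ofList theirsD.keys)
  let result := (PySem.List.sorted keys (fun k => k)).foldl (fun r k =>
      match oursD.get? k, theirsD.get? k with
      | none, some vb => r.insert k vb
      | some va, none => r.insert k va
      | some va, some vb =>
        let cmp := compare_semver va vb
        if cmp > 0 then r.insert k va
        else if cmp < 0 then r.insert k vb
        else if prefer_side == "ours" then r.insert k va else r.insert k vb
      | none, none => r)    -- unreachable: every k comes from the union of the two key sets
    PySem.Dict.empty
  result.items

-- ===== PORT B =====
-- the conflict winner for one shared key (the else-branch of Source B's lockstep loop)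
def pvPick (pref : Bool) (va vb : String) : String :=
  let c := compare_semver va vb
  if c > 0 then va else if c < 0 then vb else if pref then va else vb

-- Source B's two-pointer while loop: lockstep walk of the two key-sorted item lists
-- (the two trailing 'merged.extend' loops are the one-sided base cases)
def pvMergeL (pref : Bool) : List (String × String) → List (String × String) → List (String × String)
  | [], ys => ys
  | x :: xs, [] => x :: xs
  | x :: xs, y :: ys =>
    if x.1 < y.1 then x :: pvMergeL pref xs (y :: ys)
    else if y.1 < x.1 then y :: pvMergeL pref (x :: xs) ys
    else (x.1, pvPick pref x.2 y.2) :: pvMergeL pref xs ys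
termination_by xs ys => xs.length + ys.length

def merge_dep_maps_alt (ours : List (String × String)) (theirs : List (String × String)) (prefer_side : String) : List (String × String) :=
  let a := PySem.List.sorted (PySem.Dict.ofList ours).items (fun kv => kv.1)
  let b := PySem.List.sorted (PySem.Dict.ofList theirs).items (fun kv => kv.1)
  let merged := pvMergeL (prefer_side == "ours") a b
  (PySem.Dict.ofList merged).items

-- ===== PRECONDITION & SPEC =====
def Spec_merge_dep_maps (ours : List (String × String)) (theirs : List (String × String)) (prefer_side : String) (out : List (String × String)) : Prop := out = merge_dep_maps_alt ours theirs prefer_side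
instance (ours : List (String × String)) (theirs : List (String × String)) (prefer_side : String) (out : List (String × String)) : Decidable (Spec_merge_dep_maps ours theirs prefer_side out) := by unfold Spec_merge_dep_maps; infer_instance

-- ===== CLAIM (what is proved, stated in full; the proofs are below) =====
def Claim_equal_merge_dep_maps : Prop := ∀ (ours : List (String × String)) (theirs : List (String × String)) (prefer_side : String), Dom_merge_dep_maps ours theirs prefer_side → Spec_merge_dep_maps ours theirs prefer_side (merge_dep_maps ours theirs prefer_side)

-- ===== LEMMAS AND PROOFS =====

-- the common per-key winner, written with A's branch structure
def pvChoice (oursD theirsD : PySem.Dict String String) (prefer_side : String) (k : String) : String :=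
  match oursD.get? k, theirsD.get? k with
  | none, some vb => vb
  | some va, none => va
  | some va, some vb => pvPick (prefer_side == "ours") va vb
  | none, none => ""

theorem pv_lookup_cons (k : String) (p : String × String) (l : List (String × String)) :
    List.lookup k (p :: l) = if k = p.1 then some p.2 else List.lookup k l := by
  rcases eq_or_ne k p.1 with h | h
  · simp [List.lookup, h]
  · simp [List.lookup, h, beq_eq_false_iff_ne.mpr h]

theorem pv_lookup_eq_none {l : List (String × String)} {k : String}
    (h : ∀ p ∈ l, k ≠ p.1) : List.lookup k l = none := by
  induction l with
  | nil => rfl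
  | cons p rest ih =>
    rw [pv_lookup_cons, if_neg (h p List.mem_cons_self)]
    exact ih (fun q hq => h q (List.mem_cons_of_mem _ hq))

theorem pv_lookup_of_mem {l : List (String × String)} {k : String} {v : String}
    (hnd : (l.map Prod.fst).Nodup) (hm : (k, v) ∈ l) : List.lookup k l = some v := by
  induction l with
  | nil => cases hm
  | cons p rest ih =>
    simp only [List.map_cons, List.nodup_cons] at hnd
    rw [pv_lookup_cons]
    rcases List.mem_cons.mp hm with h | h
    · rw [← h]
      simp
    · have hk : k ≠ p.1 := by
        intro e
        exact hnd.1 (e ▸ (List.mem_map_of_mem (f := Prod.fst) h))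
      rw [if_neg hk]
      exact ih hnd.2 h

theorem pv_mem_of_lookup {l : List (String × String)} {k : String} {v : String}
    (h : List.lookup k l = some v) : (k, v) ∈ l := by
  induction l with
  | nil => cases h
  | cons p rest ih =>
    rw [pv_lookup_cons] at h
    split_ifs at h with e
    · have : p = (k, v) := by
        cases p
        simp_all
      exact this ▸ List.mem_cons_self
    · exact List.mem_cons_of_mem _ (ih h)

-- lookup in the key-sorted items of a dict is the dict's lookup
theorem pv_lookup_sorted (d : PySem.Dict String String) (hnd : d.keys.Nodup) (k : String) :
    List.lookup k (PySem.List.sorted d.items (fun kv => kv.1)) = d.get? k := by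
  have hperm : (PySem.List.sorted d.items (fun kv => kv.1)).Perm d.items :=
    PySem.List.sorted_perm _ _ _
  cases h : d.get? k with
  | none =>
    refine pv_lookup_eq_none (fun p hp => ?_)
    have hpk : p.1 ∈ d.keys := PySem.Dict.mem_keys_of_mem_items d (hperm.mem_iff.mp hp)
    exact fun e => (PySem.Dict.get?_eq_none_iff_not_mem_keys d k).mp h (e ▸ hpk)
  | some v =>
    have hm : (k, v) ∈ d.items := PySem.Dict.mem_items_of_get?_eq_some d h
    have hnd' : ((PySem.List.sorted d.items (fun kv => kv.1)).map Prod.fst).Nodup :=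
      (hperm.map Prod.fst).nodup_iff.mpr hnd
    exact pv_lookup_of_mem hnd' (hperm.mem_iff.mpr hm)

-- every key of the merge comes from one of the two sides
theorem pvMergeL_keys (pref : Bool) (xs ys : List (String × String)) (p : String × String)
    (hp : p ∈ pvMergeL pref xs ys) : p.1 ∈ xs.map Prod.fst ∨ p.1 ∈ ys.map Prod.fst := by
  fun_induction pvMergeL pref xs ys with
  | case1 ys => exact Or.inr (List.mem_map_of_mem hp)
  | case2 x xs => exact Or.inl (List.mem_map_of_mem hp)
  | case3 x xs y ys h ih =>
    rcases List.mem_cons.mp hp with h1 | h1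
    · exact Or.inl (by simp [h1])
    · rcases ih h1 with h2 | h2
      · exact Or.inl (List.mem_cons_of_mem _ h2)
      · exact Or.inr h2
  | case4 x xs y ys h h' ih =>
    rcases List.mem_cons.mp hp with h1 | h1
    · exact Or.inr (by simp [h1])
    · rcases ih h1 with h2 | h2
      · exact Or.inl h2
      · exact Or.inr (List.mem_cons_of_mem _ h2)
  | case5 x xs y ys h h' ih =>
    rcases List.mem_cons.mp hp with h1 | h1
    · exact Or.inl (by simp [h1])
    · rcases ih h1 with h2 | h2
      · exact Or.inl (List.mem_cons_of_mem _ h2)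
      · exact Or.inr (List.mem_cons_of_mem _ h2)

-- the merge of two strictly key-increasing lists is strictly key-increasing
theorem pvMergeL_pairwise (pref : Bool) (xs ys : List (String × String))
    (hx : xs.Pairwise (fun a b => a.1 < b.1)) (hy : ys.Pairwise (fun a b => a.1 < b.1)) :
    (pvMergeL pref xs ys).Pairwise (fun a b => a.1 < b.1) := by
  fun_induction pvMergeL pref xs ys with
  | case1 ys => exact hy
  | case2 x xs => exact hx
  | case3 x xs y ys h ih =>
    rw [List.pairwise_cons] at hx ⊢
    refine ⟨?_, ih hx.2 hy⟩
    intro p hp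
    rcases pvMergeL_keys _ _ _ _ hp with hm | hm
    · rcases List.mem_map.mp hm with ⟨q, hq, hqe⟩
      exact hqe ▸ hx.1 q hq
    · rcases List.mem_map.mp hm with ⟨q, hq, hqe⟩
      rcases List.mem_cons.mp hq with h1 | h1
      · rw [← hqe, h1]; exact h
      · rw [List.pairwise_cons] at hy
        exact hqe ▸ lt_trans h (hy.1 q h1)
  | case4 x xs y ys h h' ih =>
    rw [List.pairwise_cons] at hy ⊢
    refine ⟨?_, ih hx hy.2⟩
    intro p hp
    rcases pvMergeL_keys _ _ _ _ hp with hm | hm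
    · rcases List.mem_map.mp hm with ⟨q, hq, hqe⟩
      rcases List.mem_cons.mp hq with h1 | h1
      · rw [← hqe, h1]; exact h'
      · rw [List.pairwise_cons] at hx
        exact hqe ▸ lt_trans h' (hx.1 q h1)
    · rcases List.mem_map.mp hm with ⟨q, hq, hqe⟩
      exact hqe ▸ hy.1 q hq
  | case5 x xs y ys h h' ih =>
    have hxy : x.1 = y.1 := le_antisymm (not_lt.mp h') (not_lt.mp h)
    rw [List.pairwise_cons] at hx hy ⊢
    refine ⟨?_, ih hx.2 hy.2⟩
    intro p hp
    rcases pvMergeL_keys _ _ _ _ hp with hm | hm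
    · rcases List.mem_map.mp hm with ⟨q, hq, hqe⟩
      exact hqe ▸ hx.1 q hq
    · rcases List.mem_map.mp hm with ⟨q, hq, hqe⟩
      exact hqe ▸ hxy ▸ hy.1 q hq

-- lookup semantics of the two-pointer merge
theorem pvMergeL_lookup (pref : Bool) (xs ys : List (String × String))
    (hx : xs.Pairwise (fun a b => a.1 < b.1)) (hy : ys.Pairwise (fun a b => a.1 < b.1))
    (k : String) :
    List.lookup k (pvMergeL pref xs ys) =
      match List.lookup k xs, List.lookup k ys with
      | some va, some vb => some (pvPick pref va vb)
      | some va, none => some va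
      | none, o => o := by
  fun_induction pvMergeL pref xs ys with
  | case1 ys => cases List.lookup k ys <;> rfl
  | case2 x xs => cases List.lookup k (x :: xs) <;> rfl
  | case3 x xs y ys h ih =>
    rw [List.pairwise_cons] at hx
    rcases eq_or_ne k x.1 with e | e
    · have hyn : List.lookup k (y :: ys) = none := by
        rw [List.pairwise_cons] at hy
        refine pv_lookup_eq_none (fun p hp => ?_)
        rcases List.mem_cons.mp hp with h1 | h1
        · rw [e, h1]; exact ne_of_lt h
        · rw [e]; exact ne_of_lt (lt_trans h (hy.1 p h1))
      rw [hyn, pv_lookup_cons k x (pvMergeL pref xs (y :: ys)), if_pos e,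
        pv_lookup_cons k x xs, if_pos e]
    · rw [pv_lookup_cons k x (pvMergeL pref xs (y :: ys)), if_neg e,
        pv_lookup_cons k x xs, if_neg e]
      exact ih hx.2 hy
  | case4 x xs y ys h h' ih =>
    rw [List.pairwise_cons] at hy
    rcases eq_or_ne k y.1 with e | e
    · have hxn : List.lookup k (x :: xs) = none := by
        rw [List.pairwise_cons] at hx
        refine pv_lookup_eq_none (fun p hp => ?_)
        rcases List.mem_cons.mp hp with h1 | h1
        · rw [e, h1]; exact ne_of_lt h'
        · rw [e]; exact ne_of_lt (lt_trans h' (hx.1 p h1))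
      rw [hxn, pv_lookup_cons k y (pvMergeL pref (x :: xs) ys), if_pos e,
        pv_lookup_cons k y ys, if_pos e]
    · rw [pv_lookup_cons k y (pvMergeL pref (x :: xs) ys), if_neg e,
        pv_lookup_cons k y ys, if_neg e]
      exact ih hx hy.2
  | case5 x xs y ys h h' ih =>
    have hxy : x.1 = y.1 := le_antisymm (not_lt.mp h') (not_lt.mp h)
    rw [List.pairwise_cons] at hx hy
    rcases eq_or_ne k x.1 with e | e
    · rw [pv_lookup_cons k (x.1, pvPick pref x.2 y.2) (pvMergeL pref xs ys), if_pos e,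
        pv_lookup_cons k x xs, if_pos e, pv_lookup_cons k y ys, if_pos (hxy ▸ e)]
    · rw [pv_lookup_cons k (x.1, pvPick pref x.2 y.2) (pvMergeL pref xs ys), if_neg e,
        pv_lookup_cons k x xs, if_neg e, pv_lookup_cons k y ys, if_neg (hxy ▸ e)]
      exact ih hx.2 hy.2

-- A's loop, characterised: A returns the sorted union keys mapped through the per-key winner
theorem pvA_items (ours theirs : List (String × String)) (prefer_side : String) :
    merge_dep_maps ours theirs prefer_side =
      (PySem.List.sorted
          (PySem.Set.union (PySem.Set.ofList (PySem.Dict.ofList ours (ν := String)).keys)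
            (PySem.Set.ofList (PySem.Dict.ofList theirs (ν := String)).keys)) (fun k => k)).map
        (fun k => (k, pvChoice (PySem.Dict.ofList ours) (PySem.Dict.ofList theirs) prefer_side k)) := by
  unfold merge_dep_maps
  dsimp only
  set O := PySem.Dict.ofList ours (ν := String) with hO
  set T := PySem.Dict.ofList theirs (ν := String) with hT
  set U := PySem.Set.union (PySem.Set.ofList O.keys) (PySem.Set.ofList T.keys) with hU
  have hUnodup : U.Nodup := PySem.Set.nodup_union _ _ (PySem.Set.nodup_ofList _)
  have hsU : (PySem.List.sorted U (fun k => k)).Nodup :=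
    (PySem.List.sorted_perm _ _ _).nodup_iff.mpr hUnodup
  rw [PySem.List.foldl_congr_mem _ _
      (fun r k => r.insert k (pvChoice O T prefer_side k)) _ ?_]
  · rw [PySem.Dict.items_foldl_insert_fresh _ (fun a => a) (pvChoice O T prefer_side) _
      (fun a _ => PySem.Dict.contains_empty a) (by simpa using hsU)]
    rfl
  · intro r k hk
    have hkU : k ∈ U := (PySem.List.mem_sorted _ _ _ _).1 hk
    have hmem : k ∈ O.keys ∨ k ∈ T.keys := by
      rcases (PySem.Set.mem_union _ _ _).1 hkU with h | h
      · exact Or.inl ((PySem.Set.mem_ofList _ _).1 h)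
      · exact Or.inr ((PySem.Set.mem_ofList _ _).1 h)
    unfold pvChoice
    rcases h1 : O.get? k with _ | va <;> rcases h2 : T.get? k with _ | vb
    · exfalso
      rcases hmem with h | h
      · exact ((PySem.Dict.get?_eq_none_iff_not_mem_keys _ _).1 h1) h
      · exact ((PySem.Dict.get?_eq_none_iff_not_mem_keys _ _).1 h2) h
    · simp only [h1, h2]
    · simp only [h1, h2]
    · simp only [h1, h2, pvPick]
      split_ifs <;> rfl

theorem merge_dep_maps_spec' (ours theirs : List (String × String)) (prefer_side : String) :
    merge_dep_maps ours theirs prefer_side = merge_dep_maps_alt ours theirs prefer_side := by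
  rw [pvA_items ours theirs prefer_side]
  unfold merge_dep_maps_alt
  dsimp only
  set O := PySem.Dict.ofList ours (ν := String) with hO
  set T := PySem.Dict.ofList theirs (ν := String) with hT
  set pref := prefer_side == "ours" with hpref
  set U := PySem.Set.union (PySem.Set.ofList O.keys) (PySem.Set.ofList T.keys) with hU
  set sU := PySem.List.sorted U (fun k => k) with hsUdef
  set g := fun k => (k, pvChoice O T prefer_side k) with hg
  set sO := PySem.List.sorted O.items (fun kv => kv.1) with hsO
  set sT := PySem.List.sorted T.items (fun kv => kv.1) with hsT
  set M := pvMergeL pref sO sT with hM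
  have hOnd : O.keys.Nodup := PySem.Dict.nodup_keys_ofList _
  have hTnd : T.keys.Nodup := PySem.Dict.nodup_keys_ofList _
  have hkeysO : O.items.map Prod.fst = O.keys := rfl
  have hkeysT : T.items.map Prod.fst = T.keys := rfl
  -- the two sorted item lists are strictly key-increasing
  have hsOp : sO.Pairwise (fun a b => a.1 < b.1) := by
    have hle : sO.Pairwise (fun a b => a.1 ≤ b.1) := PySem.List.sorted_pairwise _ _
    have hnd : (sO.map Prod.fst).Nodup :=
      ((PySem.List.sorted_perm _ _ _).map Prod.fst).nodup_iff.mpr (hkeysO ▸ hOnd)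
    have hne : sO.Pairwise (fun a b => a.1 ≠ b.1) := List.pairwise_map.mp hnd
    exact (hle.and hne).imp (fun h => lt_of_le_of_ne h.1 h.2)
  have hsTp : sT.Pairwise (fun a b => a.1 < b.1) := by
    have hle : sT.Pairwise (fun a b => a.1 ≤ b.1) := PySem.List.sorted_pairwise _ _
    have hnd : (sT.map Prod.fst).Nodup :=
      ((PySem.List.sorted_perm _ _ _).map Prod.fst).nodup_iff.mpr (hkeysT ▸ hTnd)
    have hne : sT.Pairwise (fun a b => a.1 ≠ b.1) := List.pairwise_map.mp hnd
    exact (hle.and hne).imp (fun h => lt_of_le_of_ne h.1 h.2)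
  -- the merged list: strictly key-increasing, with the per-key winner as lookup
  have hMp : M.Pairwise (fun a b => a.1 < b.1) := pvMergeL_pairwise pref sO sT hsOp hsTp
  have hMndf : (M.map Prod.fst).Nodup :=
    (List.pairwise_map.mpr hMp).imp (fun h => ne_of_lt h)
  have hMlk : ∀ k, List.lookup k M =
      match O.get? k, T.get? k with
      | some va, some vb => some (pvPick pref va vb)
      | some va, none => some va
      | none, o => o := by
    intro k
    rw [hM, pvMergeL_lookup pref sO sT hsOp hsTp k, hsO, hsT,
      pv_lookup_sorted O hOnd k, pv_lookup_sorted T hTnd k]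
  -- membership in M agrees with membership in sU.map g
  have hmem : ∀ p : String × String, p ∈ M ↔ p ∈ sU.map g := by
    intro p
    have hMiff : p ∈ M ↔ List.lookup p.1 M = some p.2 := by
      constructor
      · intro hp
        exact pv_lookup_of_mem hMndf (by simpa using hp)
      · intro hp
        simpa using pv_mem_of_lookup hp
    have hkU : p.1 ∈ sU ↔ (p.1 ∈ O.keys ∨ p.1 ∈ T.keys) := by
      rw [hsUdef, PySem.List.mem_sorted, hU, PySem.Set.mem_union]
      rw [PySem.Set.mem_ofList, PySem.Set.mem_ofList]
    rw [hMiff, hMlk p.1]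
    constructor
    · intro hp
      rcases h1 : O.get? p.1 with _ | va <;> rcases h2 : T.get? p.1 with _ | vb <;>
        rw [h1, h2] at hp
      · cases hp
      · refine List.mem_map.mpr ⟨p.1, hkU.mpr (Or.inr ?_), ?_⟩
        · by_contra hn
          rw [(PySem.Dict.get?_eq_none_iff_not_mem_keys T p.1).2 hn] at h2; cases h2
        · show (p.1, pvChoice O T prefer_side p.1) = p
          have hc : pvChoice O T prefer_side p.1 = p.2 := by
            unfold pvChoice; rw [h1, h2]; exact Option.some.inj hp
          rw [hc]
      · refine List.mem_map.mpr ⟨p.1, hkU.mpr (Or.inl ?_), ?_⟩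
        · by_contra hn
          rw [(PySem.Dict.get?_eq_none_iff_not_mem_keys O p.1).2 hn] at h1; cases h1
        · show (p.1, pvChoice O T prefer_side p.1) = p
          have hc : pvChoice O T prefer_side p.1 = p.2 := by
            unfold pvChoice; rw [h1, h2]; exact Option.some.inj hp
          rw [hc]
      · refine List.mem_map.mpr ⟨p.1, hkU.mpr (Or.inl ?_), ?_⟩
        · by_contra hn
          rw [(PySem.Dict.get?_eq_none_iff_not_mem_keys O p.1).2 hn] at h1; cases h1
        · show (p.1, pvChoice O T prefer_side p.1) = p
          have hc : pvChoice O T prefer_side p.1 = p.2 := by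
            unfold pvChoice; rw [h1, h2, hpref] at *; exact Option.some.inj hp
          rw [hc]
    · intro hp
      rcases List.mem_map.mp hp with ⟨k, hk, hke⟩
      have hk1 : k = p.1 := congrArg Prod.fst hke
      have hk2 : pvChoice O T prefer_side k = p.2 := congrArg Prod.snd hke
      subst hk1
      have hOT := hkU.mp hk
      rcases h1 : O.get? p.1 with _ | va <;> rcases h2 : T.get? p.1 with _ | vb <;>
        unfold pvChoice at hk2 <;> rw [h1, h2] at hk2
      · exfalso
        rcases hOT with h | h
        · exact ((PySem.Dict.get?_eq_none_iff_not_mem_keys O p.1).1 h1) h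
        · exact ((PySem.Dict.get?_eq_none_iff_not_mem_keys T p.1).1 h2) h
      · show some vb = some p.2
        exact congrArg some hk2
      · show some va = some p.2
        exact congrArg some hk2
      · show some (pvPick pref va vb) = some p.2
        rw [hpref]
        exact congrArg some hk2
  -- hence M is a permutation of sU.map g, and both are strictly key-sorted, so equal
  have hsUpair : sU.Pairwise (· < ·) := by
    have hUof : U = PySem.Set.ofList (O.keys ++ T.keys) := by
      rw [PySem.Set.ofList_append, hU]
      show (PySem.Set.ofList O.keys).update (PySem.Set.ofList T.keys) = _
      rw [PySem.Set.update_eq_append_filter, PySem.Set.update_eq_append_filter,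
        PySem.Set.ofList_ofList]
    rw [hsUdef, hUof]
    exact PySem.List.sorted_ofList_pairwise_lt _
  have hTgtp : (sU.map g).Pairwise (fun a b => a.1 < b.1) := by
    rw [List.pairwise_map]
    exact hsUpair
  have hTgtndf : ((sU.map g).map Prod.fst).Nodup :=
    (List.pairwise_map.mpr hTgtp).imp (fun h => ne_of_lt h)
  have hTgtnd : (sU.map g).Nodup := List.Nodup.of_map Prod.fst hTgtndf
  have hMnd : M.Nodup := List.Nodup.of_map Prod.fst hMndf
  have hperm : (sU.map g).Perm M :=
    ((List.perm_ext_iff_of_nodup hMnd hTgtnd).mpr hmem).symm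
  have heq : sU.map g = M :=
    List.Perm.eq_of_pairwise
      (fun a b _ _ h1 h2 => absurd (lt_trans h1 h2) (lt_irrefl _)) hTgtp hMp hperm
  rw [heq]
  -- dict(merged) of a strictly key-sorted pair list keeps the list
  show _ = (PySem.Dict.empty.update M).items
  rw [PySem.Dict.update]
  rw [PySem.Dict.items_foldl_insert_fresh M Prod.fst Prod.snd _
    (fun a _ => PySem.Dict.contains_empty _) hMndf]
  rw [show (PySem.Dict.empty : PySem.Dict String String).items = [] from rfl]
  simp

-- ===== VERDICT (by name: the statement is the Claim_ definition above) =====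
theorem merge_dep_maps_spec : Claim_equal_merge_dep_maps := by
  intro ours theirs prefer_side _
  exact merge_dep_maps_spec' ours theirs prefer_side
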